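-- pv_equiv track=rewrite | github.com/emilianstoyanov/projects-softuni | Python_Fundamentals/functions_exercise/08.array_manipulator.py | first_elements
-- ===== SOURCE A (Python) =====
-- def first_elements(numbers, count, type):
--     new_arr = []
--
--     if type == "odd":
--         for i in range(len(numbers)):
--             if numbers[i] % 2 != 0 and count > 0:
--                 new_arr.append(numbers[i])
--                 count -= 1
--     elif type == "even":
--         for i in range(len(numbers)):
--             if numbers[i] % 2 == 0 and count > 0:
--                 new_arr.append(numbers[i])
--                 count -= 1
--
--     return new_arr
-- ===== SOURCE B (Python) =====
-- def first_elements(numbers, count, type):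
--     if type == "odd":
--         want = 1
--     elif type == "even":
--         want = 0
--     else:
--         return []
--
--     def take(lst, c):
--         if c <= 0 or not lst:
--             return []
--         head, rest = lst[0], lst[1:]
--         if head % 2 == want:
--             return [head] + take(rest, c - 1)
--         return take(rest, c)
--
--     return take(numbers, count)
-- ===== Notes on version B (the rewrite author's own statement) =====
-- stated objective: alternative
-- what changed: Replaces A's full index loop with a mutating counter and append by a recursive traversal against a single parity target that conses matches front-to-back and terminates as soon as the count is exhausted (it never visits the rest of the list).
import Mathlib
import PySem

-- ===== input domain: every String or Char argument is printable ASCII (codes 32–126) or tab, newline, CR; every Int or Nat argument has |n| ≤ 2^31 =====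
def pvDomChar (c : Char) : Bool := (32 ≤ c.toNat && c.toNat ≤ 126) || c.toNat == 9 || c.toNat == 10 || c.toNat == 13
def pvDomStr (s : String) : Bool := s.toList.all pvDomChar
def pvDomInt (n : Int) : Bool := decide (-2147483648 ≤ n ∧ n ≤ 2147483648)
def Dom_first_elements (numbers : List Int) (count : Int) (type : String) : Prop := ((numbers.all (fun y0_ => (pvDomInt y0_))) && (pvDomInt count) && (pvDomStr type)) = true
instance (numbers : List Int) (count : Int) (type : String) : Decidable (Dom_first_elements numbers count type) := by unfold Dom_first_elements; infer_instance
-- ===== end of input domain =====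

-- B replaces A's full index loop (mutating counter + append) with a recursive
-- traversal against one parity target that conses matches and stops early once
-- the count is exhausted (alternative decomposition; same asymptotic cost).


-- ===== PORT A =====
-- A's loop: walk the whole list in order, appending a matching element and
-- decrementing count whenever count > 0; state is (new_arr, count).
def pvStepA (pred : Int → Bool) (st : List Int × Int) (n : Int) : List Int × Int :=
  if pred n && decide (st.2 > 0) then (st.1 ++ [n], st.2 - 1) else st

def first_elements (numbers : List Int) (count : Int) (type : String) : List Int :=
  if type == "odd" then
    (numbers.foldl (pvStepA (fun n => n % 2 != 0)) ([], count)).1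
  else if type == "even" then
    (numbers.foldl (pvStepA (fun n => n % 2 == 0)) ([], count)).1
  else []

-- ===== PORT B =====
-- B's helper `take`: recursion on the list, consing matches, stopping when c ≤ 0.
def pvTakeB (want : Int) : List Int → Int → List Int
  | [], _ => []
  | h :: t, c =>
    if c ≤ 0 then []
    else if h % 2 == want then h :: pvTakeB want t (c - 1)
    else pvTakeB want t c

def first_elements_alt (numbers : List Int) (count : Int) (type : String) : List Int :=
  if type == "odd" then pvTakeB 1 numbers count
  else if type == "even" then pvTakeB 0 numbers count
  else []

-- ===== PRECONDITION & SPEC =====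
def Spec_first_elements (numbers : List Int) (count : Int) (type : String) (out : List Int) : Prop := out = first_elements_alt numbers count type
instance (numbers : List Int) (count : Int) (type : String) (out : List Int) : Decidable (Spec_first_elements numbers count type out) := by unfold Spec_first_elements; infer_instance

-- ===== CLAIM (what is proved, stated in full; the proofs are below) =====
def Claim_equal_first_elements : Prop := ∀ (numbers : List Int) (count : Int) (type : String), Dom_first_elements numbers count type → Spec_first_elements numbers count type (first_elements numbers count type)

-- ===== LEMMAS AND PROOFS =====
theorem foldl_stepA_eq_takeB (pred : Int → Bool) (want : Int)
    (hpw : ∀ n : Int, pred n = (n % 2 == want)) :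
    ∀ (l acc : List Int) (c : Int),
      (l.foldl (pvStepA pred) (acc, c)).1 = acc ++ pvTakeB want l c := by
  intro l
  induction l with
  | nil => intro acc c; simp [pvTakeB]
  | cons n rest ih =>
    intro acc c
    by_cases hc : c ≤ 0
    · have hstop : pvTakeB want (n :: rest) c = [] := by simp [pvTakeB, hc]
      rw [hstop, List.foldl_cons]
      have hs : pvStepA pred (acc, c) n = (acc, c) := by
        simp [pvStepA]; omega
      rw [hs, ih]
      have : pvTakeB want rest c = [] := by
        cases rest <;> simp [pvTakeB, hc]
      simp [this]
    · by_cases hp : pred n = true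
      · have hm : (n % 2 == want) = true := by rw [← hpw]; exact hp
        rw [List.foldl_cons]
        have hs : pvStepA pred (acc, c) n = (acc ++ [n], c - 1) := by
          simp [pvStepA, hp]; omega
        rw [hs, ih]
        simp [pvTakeB, hc, hm]
      · have hm : ¬ (n % 2 == want) = true := by rw [← hpw]; simp [hp]
        rw [List.foldl_cons]
        have hs : pvStepA pred (acc, c) n = (acc, c) := by
          simp [pvStepA, hp]
        rw [hs, ih]
        simp [pvTakeB, hc, hm]

-- ===== VERDICT (by name: the statement is the Claim_ definition above) =====
theorem first_elements_spec : Claim_equal_first_elements := by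
  intro numbers count type _
  unfold Spec_first_elements first_elements first_elements_alt
  split_ifs with h1 h2
  · exact foldl_stepA_eq_takeB _ 1 (by intro n; rcases Int.emod_two_eq n with h | h <;> simp [h]) numbers [] count
  · exact foldl_stepA_eq_takeB _ 0 (fun _ => rfl) numbers [] count
  · rfl
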